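-- pv_equiv track=rewrite | github.com/hasan-moni-321/assignment_rhyan | problem_1.py | find_max_difference_in_power
-- ===== SOURCE A (Python) =====
-- def isPalindrome(s):
--     return s == s[::-1]
--
-- def find_max_difference_in_power(l):
--     squares = []
--     for s in l:
--         palindrome_ = isPalindrome(s)
--         if palindrome_:
--             square_string = len(s) // 2 + 5
--         else:
--             square_string = len(s) // 2 + 1
--         squares.append(square_string)
--
--     # sorting squares list and finding minimum and maximum number
--     squares.sort()
--     squares_min = squares[0]
--     squares_max = squares[-1]
--     # returning maximum difference
--     return squares_max - squares_min
-- ===== SOURCE B (Python) =====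
-- def find_max_difference_in_power(l):
--     s = l[0]
--     v = len(s) // 2 + (5 if s == s[::-1] else 1)
--     lo = hi = v
--     for t in l[1:]:
--         v = len(t) // 2 + (5 if t == t[::-1] else 1)
--         lo = min(lo, v)
--         hi = max(hi, v)
--     return hi - lo
-- ===== Notes on version B (the rewrite author's own statement) =====
-- stated objective: simpler
-- what changed: B drops A's intermediate list, sort and index-the-ends pipeline and instead seeds running min/max from the first string's derived value and updates them in one pass, returning max-min.
import Mathlib
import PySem

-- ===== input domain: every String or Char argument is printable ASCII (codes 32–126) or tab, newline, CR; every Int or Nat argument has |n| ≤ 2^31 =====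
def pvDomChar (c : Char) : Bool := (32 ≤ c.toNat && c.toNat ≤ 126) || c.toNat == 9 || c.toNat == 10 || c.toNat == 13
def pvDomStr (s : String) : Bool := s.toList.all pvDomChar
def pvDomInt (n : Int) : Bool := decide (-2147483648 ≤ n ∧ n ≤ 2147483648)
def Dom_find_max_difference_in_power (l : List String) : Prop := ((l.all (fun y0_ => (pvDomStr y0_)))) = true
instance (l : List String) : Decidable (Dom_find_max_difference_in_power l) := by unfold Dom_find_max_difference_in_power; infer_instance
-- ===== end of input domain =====

-- B replaces A's build-list / sort / index-ends pipeline by a single scan keeping running min and max (objective: simpler; no asymptotic claim).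

-- ===== PORT A =====
-- isPalindrome(s): s == s[::-1]
def pvIsPalindrome (s : String) : Bool :=
  s == ((PySem.Str.slice? s none none (-1)).getD "")   -- step = -1 ≠ 0, so slice? is always some

def find_max_difference_in_power (l : List String) : Int :=
  let squares := l.foldl (fun acc s =>
    let palindrome_ := pvIsPalindrome s
    let square_string : Int :=
      if palindrome_ then PySem.Int.floordiv (PySem.Str.len s) 2 + 5
      else PySem.Int.floordiv (PySem.Str.len s) 2 + 1
    acc ++ [square_string]) []
  let sq := PySem.List.sorted squares (fun x => x) false
  ((PySem.List.pyGet? sq (-1)).getD 0) - ((PySem.List.pyGet? sq 0).getD 0)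
  -- squares[0] / squares[-1] raise IndexError on the empty list: excluded by Pre_ (getD default unreachable inside Pre_)

-- ===== PORT B =====
def pvPower (t : String) : Int :=
  PySem.Int.floordiv (PySem.Str.len t) 2 + (if pvIsPalindrome t then 5 else 1)

def find_max_difference_in_power_alt (l : List String) : Int :=
  match l with
  | [] => 0   -- Python B raises IndexError on l[0] here: outside Pre_
  | s :: rest =>
    let v := pvPower s
    let mm := rest.foldl (fun (p : Int × Int) t =>
      let v := pvPower t
      (min p.1 v, max p.2 v)) (v, v)
    mm.2 - mm.1

-- ===== PRECONDITION & SPEC =====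
-- Both Pythons raise IndexError on the empty list (A on squares[0], B on l[0]).
def Pre_find_max_difference_in_power (l : List String) : Prop := l ≠ []
instance (l : List String) : Decidable (Pre_find_max_difference_in_power l) := by unfold Pre_find_max_difference_in_power; infer_instance
def pvWitness_find_max_difference_in_power : List String := ["ab", "aba"]

def Spec_find_max_difference_in_power (l : List String) (out : Int) : Prop := out = find_max_difference_in_power_alt l
instance (l : List String) (out : Int) : Decidable (Spec_find_max_difference_in_power l out) := by unfold Spec_find_max_difference_in_power; infer_instance

-- ===== CLAIM (what is proved, stated in full; the proofs are below) =====
def Claim_equal_find_max_difference_in_power : Prop := ∀ (l : List String), Dom_find_max_difference_in_power l → Pre_find_max_difference_in_power l → Spec_find_max_difference_in_power l (find_max_difference_in_power l)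

-- ===== LEMMAS AND PROOFS =====

-- last element of a ≤-sorted list bounds every member
theorem pv_le_getLast (zs : List Int) (h : zs.Pairwise (· ≤ ·)) (m : Int)
    (hm : zs.getLast? = some m) : ∀ y ∈ zs, y ≤ m := by
  induction zs with
  | nil => simp at hm
  | cons a t ih =>
    intro y hy
    cases t with
    | nil =>
      simp at hm hy; omega
    | cons b u =>
      have hm' : (b :: u).getLast? = some m := by
        simpa [List.getLast?_cons_cons] using hm
      have hpw := (List.pairwise_cons.mp h)
      rcases List.mem_cons.mp hy with rfl | hy'
      · have hb : y ≤ b := hpw.1 b (by simp)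
        have := ih hpw.2 hm' b (by simp)
        omega
      · exact ih hpw.2 hm' y hy'

-- B's fold computes running min and max of the mapped values
theorem pv_fold_minmax (rest : List String) (a b : Int) :
    rest.foldl (fun (p : Int × Int) t =>
      let v := pvPower t
      (min p.1 v, max p.2 v)) (a, b)
    = ((rest.map pvPower).foldl min a, (rest.map pvPower).foldl max b) := by
  induction rest generalizing a b with
  | nil => rfl
  | cons x xs ih => simp [List.foldl_cons, ih]

-- A's squares list is the map of pvPower
theorem pv_squares_eq_map (l : List String) :
    l.foldl (fun acc s =>
      let palindrome_ := pvIsPalindrome s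
      let square_string : Int :=
        if palindrome_ then PySem.Int.floordiv (PySem.Str.len s) 2 + 5
        else PySem.Int.floordiv (PySem.Str.len s) 2 + 1
      acc ++ [square_string]) []
    = l.map pvPower := by
  have hfun : (fun (acc : List Int) s =>
      let palindrome_ := pvIsPalindrome s
      let square_string : Int :=
        if palindrome_ then PySem.Int.floordiv (PySem.Str.len s) 2 + 5
        else PySem.Int.floordiv (PySem.Str.len s) 2 + 1
      acc ++ [square_string]) = fun acc s => acc ++ [pvPower s] := by
    funext acc s
    simp only [pvPower]
    split_ifs <;> rfl
  rw [hfun, PySem.List.foldl_append_singleton_eq_map]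
  simp

-- ===== VERDICT (by name: the statement is the Claim_ definition above) =====
theorem find_max_difference_in_power_spec : Claim_equal_find_max_difference_in_power := by
  intro l _ hpre
  unfold Spec_find_max_difference_in_power
  match l with
  | [] => exact absurd rfl hpre
  | s :: rest =>
    show find_max_difference_in_power (s :: rest) = _
    unfold find_max_difference_in_power find_max_difference_in_power_alt
    simp only [pv_squares_eq_map, pv_fold_minmax]
    set L : List Int := (s :: rest).map pvPower with hL
    set sq := PySem.List.sorted L (fun x => x) false with hsq
    have hperm : sq.Perm L := by rw [hsq]; exact PySem.List.sorted_perm L (fun x => x) false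
    have hne : sq ≠ [] := by
      intro h0
      have := hperm.length_eq
      simp [h0, hL] at this
    -- min side
    have hmin : PySem.List.min? L (fun y => y) = some ((rest.map pvPower).foldl min (pvPower s)) := by
      simpa [hL] using PySem.List.min?_id_cons (x := pvPower s) (t := rest.map pvPower)
    have hminmem : (rest.map pvPower).foldl min (pvPower s) ∈ L := PySem.List.min?_mem hmin
    have hminle : ∀ y ∈ L, (rest.map pvPower).foldl min (pvPower s) ≤ y :=
      PySem.List.min?_isMin hmin
    -- max side
    have hmax : PySem.List.max? L (fun y => y) = some ((rest.map pvPower).foldl max (pvPower s)) := by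
      simpa [hL] using PySem.List.max?_id_cons (x := pvPower s) (t := rest.map pvPower)
    have hmaxmem : (rest.map pvPower).foldl max (pvPower s) ∈ L := PySem.List.max?_mem hmax
    have hmaxge : ∀ y ∈ L, y ≤ (rest.map pvPower).foldl max (pvPower s) :=
      PySem.List.max?_isMax hmax
    -- head of sq
    obtain ⟨m, t, hmt⟩ : ∃ m t, sq = m :: t := by
      cases hsqc : sq with
      | nil => exact absurd hsqc hne
      | cons m t => exact ⟨m, t, rfl⟩
    have hheadle : ∀ y ∈ L, m ≤ y := fun y hy =>
      PySem.List.key_head_sorted_le L (fun x => x) (hsq.symm.trans hmt) y hy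
    have hmmem : m ∈ L := hperm.mem_iff.mp (by simp [hmt])
    have hmeq : m = (rest.map pvPower).foldl min (pvPower s) :=
      le_antisymm (hheadle _ hminmem) (hminle _ hmmem)
    -- last of sq
    have hpw : sq.Pairwise (· ≤ ·) := by
      rw [hsq]
      simpa using PySem.List.sorted_pairwise L (fun (x : Int) => x)
    obtain ⟨z, hz⟩ : ∃ z, sq.getLast? = some z := by
      cases hg : sq.getLast? with
      | none => exact absurd (List.getLast?_eq_none_iff.mp hg) hne
      | some z => exact ⟨z, rfl⟩
    have hzmem : z ∈ L := hperm.mem_iff.mp (List.mem_of_getLast? hz)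
    have hzge : ∀ y ∈ L, y ≤ z := fun y hy =>
      pv_le_getLast sq hpw z hz y (hperm.mem_iff.mpr hy)
    have hzeq : z = (rest.map pvPower).foldl max (pvPower s) :=
      le_antisymm (hmaxge _ hzmem) (hzge _ hmaxmem)
    -- assemble
    rw [PySem.List.pyGet?_neg_one, hz, hmt]
    simp [hmeq, hzeq]
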